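-- pv_equiv track=rewrite | github.com/869277160/MyLeetCode | 1222.可以攻击国王的皇后.py | QueenSearch
-- ===== SOURCE A (Python) =====
-- def QueenSearch(queens,kings):
--
--     if len(queens) == 1 :
--         return [queens[0]]
--     else :
--         all_dis = [(queen[0]-kings[0])**2+(queen[1]-kings[1])**2 for queen in queens]
--         for i in range(len(all_dis)):
--             if all_dis[i] == min(all_dis):
--                 return [queens[i]]
-- ===== SOURCE B (Python) =====
-- def QueenSearch(queens, kings):
--     return [min(queens, key=lambda q: (q[0] - kings[0]) ** 2 + (q[1] - kings[1]) ** 2)]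
-- ===== Notes on version B (the rewrite author's own statement) =====
-- stated objective: simpler
-- what changed: Replaces A's distance-list plus index loop that recomputes min(all_dis) on every iteration with a single min(queens, key=...) pass (Python's min returns the first minimal element, matching A's first-minimum return).
-- outside the precondition, e.g. on QueenSearch([], [0, 0]): A returns None, B raises ValueError; on QueenSearch([[1]], []): A returns [[1]], B raises IndexError
import Mathlib
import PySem

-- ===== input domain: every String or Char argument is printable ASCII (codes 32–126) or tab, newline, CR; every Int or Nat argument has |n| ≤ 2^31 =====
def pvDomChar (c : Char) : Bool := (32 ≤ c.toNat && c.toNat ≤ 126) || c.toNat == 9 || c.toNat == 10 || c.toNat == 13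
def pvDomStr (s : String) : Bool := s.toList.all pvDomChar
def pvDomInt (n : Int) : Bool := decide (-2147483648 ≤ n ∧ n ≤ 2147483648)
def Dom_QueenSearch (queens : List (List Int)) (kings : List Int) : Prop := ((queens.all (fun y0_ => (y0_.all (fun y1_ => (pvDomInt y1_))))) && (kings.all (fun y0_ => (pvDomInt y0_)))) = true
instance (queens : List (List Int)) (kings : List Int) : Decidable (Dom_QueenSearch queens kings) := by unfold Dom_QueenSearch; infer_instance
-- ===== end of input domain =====

-- B replaces A's distance list + index loop (which recomputes min(all_dis) each iteration)
-- by a single first-minimum pass min(queens, key=squared distance); objective: simpler.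


-- ===== PORT A =====
-- xs[i] on an Int list; inside Pre_ the index is always in range, the default is never hit
def pyGetI (xs : List Int) (i : Int) : Int := (PySem.List.pyGet? xs i).getD 0

-- the squared distance both Pythons compute for one queen; '** 2' is ported as
-- self-multiplication (exact for integer squaring; '^' is kernel-irreducible here)
def pvDist (kings queen : List Int) : Int :=
  let dx := pyGetI queen 0 - pyGetI kings 0
  let dy := pyGetI queen 1 - pyGetI kings 1
  dx * dx + dy * dy

-- A's "for i in range(len(all_dis)): if all_dis[i] == min(all_dis): return [queens[i]]",
-- walking queens and all_dis in step; falls through to [] (Python's implicit None) if no hit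
def pvScanA (all_dis : List Int) (queens : List (List Int)) (rest : List Int) : List (List Int) :=
  match queens, rest with
  | q :: qs, d :: ds =>
      if d = (PySem.List.min? all_dis (fun x => x)).getD 0 then [q] else pvScanA all_dis qs ds
  | _, _ => []

def QueenSearch (queens : List (List Int)) (kings : List Int) : List (List Int) :=
  if queens.length = 1 then [(PySem.List.pyGet? queens 0).getD []]
  else
    let all_dis := queens.map (fun queen => pvDist kings queen)
    pvScanA all_dis queens all_dis

-- ===== PORT B =====
def QueenSearch_alt (queens : List (List Int)) (kings : List Int) : List (List Int) :=
  [(PySem.List.min? queens (fun q => pvDist kings q)).getD []]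

-- ===== PRECONDITION & SPEC =====
-- Exactly the inputs where neither Python raises: Python A returns None (no list) on empty
-- queens, and on a single malformed queen/kings A's len==1 branch returns [queens[0]] while
-- B's key function raises IndexError, so rows and kings must have ≥ 2 coordinates.
def Pre_QueenSearch (queens : List (List Int)) (kings : List Int) : Prop :=
  queens ≠ [] ∧ 2 ≤ kings.length ∧ ∀ q ∈ queens, 2 ≤ q.length
instance (queens : List (List Int)) (kings : List Int) : Decidable (Pre_QueenSearch queens kings) := by unfold Pre_QueenSearch; infer_instance

def pvWitness_QueenSearch : List (List Int) × List Int := ([[0, 3], [2, 1], [2, 0]], [1, 1])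

def Spec_QueenSearch (queens : List (List Int)) (kings : List Int) (out : List (List Int)) : Prop := out = QueenSearch_alt queens kings
instance (queens : List (List Int)) (kings : List Int) (out : List (List Int)) : Decidable (Spec_QueenSearch queens kings out) := by unfold Spec_QueenSearch; infer_instance

-- ===== CLAIM (what is proved, stated in full; the proofs are below) =====
def Claim_equal_QueenSearch : Prop := ∀ (queens : List (List Int)) (kings : List Int), Dom_QueenSearch queens kings → Pre_QueenSearch queens kings → Spec_QueenSearch queens kings (QueenSearch queens kings)

-- ===== LEMMAS AND PROOFS =====

-- the first element of xs whose key equals t, as a ≤1-element list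
def pvFirstWith (d : List Int → Int) (t : Int) : List (List Int) → List (List Int)
  | [] => []
  | x :: xs => if d x = t then [x] else pvFirstWith d t xs

-- A's scan with the full distance list threaded along is a first-match search for the min value
theorem pvScanA_eq_firstWith (d : List Int → Int) (all_dis : List Int) :
    ∀ xs : List (List Int),
      pvScanA all_dis xs (xs.map d)
        = pvFirstWith d ((PySem.List.min? all_dis (fun x => x)).getD 0) xs := by
  intro xs
  induction xs with
  | nil => rfl
  | cons x xs ih => simp [pvScanA, pvFirstWith, ih]

-- one step of Python's min-with-key fold (exactly PySem.List.min?'s folded function)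
def pvStep (d : List Int → Int) (acc : Option (List Int)) (x : List Int) : Option (List Int) :=
  match acc with
  | none => some x
  | some m => if d x < d m then some x else some m

theorem pv_min?_eq_foldl (d : List Int → Int) (xs : List (List Int)) :
    PySem.List.min? xs d = List.foldl (pvStep d) none xs := by
  simp only [PySem.List.min?]
  congr 1
  funext acc x
  cases acc <;> simp [pvStep]

-- the running-minimum fold keeps the FIRST minimal element
theorem pv_foldl_min_first (d : List Int → Int) :
    ∀ (xs : List (List Int)) (a w : List Int),
      List.foldl (pvStep d) (some a) xs = some w →
      d w ≤ d a ∧ (d w = d a → w = a) ∧ (d w < d a → pvFirstWith d (d w) xs = [w]) := by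
  intro xs
  induction xs with
  | nil =>
      intro a w h
      simp only [List.foldl_nil, Option.some.injEq] at h
      subst h
      exact ⟨le_refl _, fun _ => rfl, fun h => absurd h (lt_irrefl _)⟩
  | cons x xs ih =>
      intro a w h
      simp only [List.foldl_cons, pvStep] at h
      by_cases hx : d x < d a
      · rw [if_pos hx] at h
        obtain ⟨h1, h2, h3⟩ := ih x w h
        refine ⟨le_trans h1 (le_of_lt hx), ?_, ?_⟩
        · intro he; exact absurd he (ne_of_lt (lt_of_le_of_lt h1 hx))
        · intro _
          by_cases hxw : d w = d x
          · rw [pvFirstWith, if_pos hxw.symm, h2 hxw]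
          · rw [pvFirstWith, if_neg (fun he => hxw he.symm)]
            exact h3 (lt_of_le_of_ne h1 hxw)
      · rw [if_neg hx] at h
        obtain ⟨h1, h2, h3⟩ := ih a w h
        refine ⟨h1, h2, ?_⟩
        intro hlt
        rw [pvFirstWith, if_neg, h3 hlt]
        intro he
        exact hx (lt_of_le_of_lt (le_of_eq he) hlt)

-- min? returns the FIRST minimal element: a first-match scan for its key finds exactly it
theorem pv_min?_firstWith (d : List Int → Int) (xs : List (List Int)) (w : List Int)
    (h : PySem.List.min? xs d = some w) : pvFirstWith d (d w) xs = [w] := by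
  cases xs with
  | nil => simp [PySem.List.min?] at h
  | cons x t =>
      have h' : List.foldl (pvStep d) (some x) t = some w := by
        rw [pv_min?_eq_foldl, List.foldl_cons] at h
        exact h
      obtain ⟨h1, h2, h3⟩ := pv_foldl_min_first d t x w h'
      rcases lt_or_eq_of_le h1 with hlt | heq
      · rw [pvFirstWith, if_neg (fun he => (ne_of_lt hlt) he.symm), h3 hlt]
      · rw [pvFirstWith, if_pos heq.symm, h2 heq]

-- the min over the mapped distance list is the key of min?'s winner
theorem pv_min_map_eq (d : List Int → Int) (xs : List (List Int)) (w : List Int)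
    (h : PySem.List.min? xs d = some w) :
    (PySem.List.min? (xs.map d) (fun x => x)).getD 0 = d w := by
  have hne : xs ≠ [] := by rintro rfl; simp [PySem.List.min?] at h
  have hmne : xs.map d ≠ [] := by simpa using hne
  obtain ⟨v, hv⟩ : ∃ v, PySem.List.min? (xs.map d) (fun x => x) = some v := by
    cases hv : PySem.List.min? (xs.map d) (fun x => x) with
    | none => exact absurd ((PySem.List.min?_eq_none_iff _ _).mp hv) hmne
    | some v => exact ⟨v, rfl⟩
  have hvmem : v ∈ xs.map d := PySem.List.min?_mem hv
  obtain ⟨y, hy, hyv⟩ := List.mem_map.mp hvmem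
  have h1 : d w ≤ v := hyv ▸ PySem.List.min?_isMin h y hy
  have h2 : v ≤ d w :=
    PySem.List.min?_isMin hv (d w) (List.mem_map.mpr ⟨w, PySem.List.min?_mem h, rfl⟩)
  rw [hv]
  exact le_antisymm h2 h1

-- ===== VERDICT (by name: the statement is the Claim_ definition above) =====
theorem QueenSearch_spec : Claim_equal_QueenSearch := by
  intro queens kings _ hpre
  obtain ⟨hne, -, -⟩ := hpre
  unfold Spec_QueenSearch QueenSearch QueenSearch_alt
  set d := fun q => pvDist kings q with hd
  obtain ⟨w, hw⟩ : ∃ w, PySem.List.min? queens d = some w := by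
    cases hv : PySem.List.min? queens d with
    | none => exact absurd ((PySem.List.min?_eq_none_iff _ _).mp hv) hne
    | some w => exact ⟨w, rfl⟩
  have hfirst : pvFirstWith d (d w) queens = [w] := pv_min?_firstWith d queens w hw
  by_cases hlen : queens.length = 1
  · rw [if_pos hlen]
    obtain ⟨q, rfl⟩ : ∃ q, queens = [q] := by
      cases queens with
      | nil => simp at hlen
      | cons a t =>
          cases t with
          | nil => exact ⟨a, rfl⟩
          | cons b t2 => simp at hlen
    have : w = q := by
      have := PySem.List.min?_mem hw
      simpa using this
    subst this
    rw [hw]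
    simp [PySem.List.pyGet?, PySem.List.pyIdx?]
  · rw [if_neg hlen]
    rw [pvScanA_eq_firstWith d (queens.map d) queens,
        pv_min_map_eq d queens w hw, hfirst, hw]
    rfl
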